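-- pv_equiv track=rewrite | github.com/szche/Matura | Zbior_Zadan_CKE/064/main.py | sprawdz_rekurencje
-- ===== SOURCE A (Python) =====
-- def sprawdz_rekurencje(obraz):
--     cwiartka1 = [cwierc[:len(cwierc)//2] for cwierc in obraz[:len(obraz)//2]]
--     cwiartka2 = [cwierc[len(cwierc)//2:] for cwierc in obraz[:len(obraz)//2]]
--     cwiartka3 = [cwierc[:len(cwierc)//2] for cwierc in obraz[len(obraz)//2:]]
--     cwiartka4 = [cwierc[len(cwierc)//2:] for cwierc in obraz[len(obraz)//2:]]
--     if cwiartka1 == cwiartka2 and cwiartka1 == cwiartka3 and cwiartka1 == cwiartka4: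
--         return True
--     return False
-- ===== SOURCE B (Python) =====
-- def sprawdz_rekurencje(obraz):
--     # Canonicalize-and-compare: rebuild the image a 4-quadrant-identical image
--     # would be from its top-left quadrant, and compare it whole to the input.
--     blok = [wiersz[:len(wiersz) // 2] * 2 for wiersz in obraz[:len(obraz) // 2]]
--     return obraz == blok * 2
-- ===== Notes on version B (the rewrite author's own statement) =====
-- stated objective: simpler
-- what changed: Instead of decomposing the image into four quadrant lists and comparing them pairwise, B reconstructs the canonical image a quadrant-identical picture would be from its top-left quadrant (each half-row doubled, the half-block doubled) and makes one whole-image equality comparison.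
import Mathlib
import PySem

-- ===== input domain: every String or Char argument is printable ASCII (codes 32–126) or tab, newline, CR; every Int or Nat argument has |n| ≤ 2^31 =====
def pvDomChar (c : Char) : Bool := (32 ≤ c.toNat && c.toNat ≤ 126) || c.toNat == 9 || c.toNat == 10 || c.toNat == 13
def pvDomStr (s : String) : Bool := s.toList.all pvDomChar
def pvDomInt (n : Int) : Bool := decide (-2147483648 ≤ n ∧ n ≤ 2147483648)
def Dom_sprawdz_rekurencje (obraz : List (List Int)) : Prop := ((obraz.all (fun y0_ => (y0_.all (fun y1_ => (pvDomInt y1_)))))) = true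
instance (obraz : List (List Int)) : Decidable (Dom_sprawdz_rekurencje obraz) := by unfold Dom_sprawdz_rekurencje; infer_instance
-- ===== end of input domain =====

-- B reconstructs the canonical image a quadrant-identical picture would be from its
-- top-left quadrant (each half-row doubled, the half-block doubled) and makes one
-- whole-image equality comparison, instead of building four quadrant lists and
-- comparing them pairwise (objective: simpler).

-- ===== PORT A =====
def sprawdz_rekurencje (obraz : List (List Int)) : Bool :=
  let cwiartka1 := (PySem.List.slice obraz none (some (PySem.Int.floordiv (obraz.length : Int) 2))).map
    (fun cwierc => PySem.List.slice cwierc none (some (PySem.Int.floordiv (cwierc.length : Int) 2)))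
  let cwiartka2 := (PySem.List.slice obraz none (some (PySem.Int.floordiv (obraz.length : Int) 2))).map
    (fun cwierc => PySem.List.slice cwierc (some (PySem.Int.floordiv (cwierc.length : Int) 2)) none)
  let cwiartka3 := (PySem.List.slice obraz (some (PySem.Int.floordiv (obraz.length : Int) 2)) none).map
    (fun cwierc => PySem.List.slice cwierc none (some (PySem.Int.floordiv (cwierc.length : Int) 2)))
  let cwiartka4 := (PySem.List.slice obraz (some (PySem.Int.floordiv (obraz.length : Int) 2)) none).map
    (fun cwierc => PySem.List.slice cwierc (some (PySem.Int.floordiv (cwierc.length : Int) 2)) none)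
  if cwiartka1 == cwiartka2 && cwiartka1 == cwiartka3 && cwiartka1 == cwiartka4 then true else false

-- ===== PORT B =====
-- `wiersz[:len(wiersz)//2] * 2` is the half-row appended to itself; `blok * 2` likewise.
def sprawdz_rekurencje_alt (obraz : List (List Int)) : Bool :=
  let blok := (PySem.List.slice obraz none (some (PySem.Int.floordiv (obraz.length : Int) 2))).map
    (fun wiersz =>
      (PySem.List.slice wiersz none (some (PySem.Int.floordiv (wiersz.length : Int) 2))) ++
      (PySem.List.slice wiersz none (some (PySem.Int.floordiv (wiersz.length : Int) 2))))
  obraz == blok ++ blok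

-- ===== PRECONDITION & SPEC =====
def Spec_sprawdz_rekurencje (obraz : List (List Int)) (out : Bool) : Prop := out = sprawdz_rekurencje_alt obraz
instance (obraz : List (List Int)) (out : Bool) : Decidable (Spec_sprawdz_rekurencje obraz out) := by unfold Spec_sprawdz_rekurencje; infer_instance

-- ===== CLAIM (what is proved, stated in full; the proofs are below) =====
def Claim_equal_sprawdz_rekurencje : Prop := ∀ (obraz : List (List Int)), Dom_sprawdz_rekurencje obraz → Spec_sprawdz_rekurencje obraz (sprawdz_rekurencje obraz)

-- ===== LEMMAS AND PROOFS =====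

-- the two halves of a row, and the canonical row built from the left half
def pvL (r : List Int) : List Int := r.take (r.length / 2)
def pvR (r : List Int) : List Int := r.drop (r.length / 2)
def pvF (r : List Int) : List Int := pvL r ++ pvL r

theorem pv_floordiv_len (m : Nat) : PySem.Int.floordiv (m : Int) 2 = ((m / 2 : Nat) : Int) := by
  exact_mod_cast PySem.Int.floordiv_natCast m 2

theorem pv_sliceL (r : List Int) :
    PySem.List.slice r none (some (PySem.Int.floordiv (r.length : Int) 2)) = pvL r := by
  rw [pv_floordiv_len, PySem.List.slice_to_natCast]; rfl

theorem pv_sliceR (r : List Int) :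
    PySem.List.slice r (some (PySem.Int.floordiv (r.length : Int) 2)) none = pvR r := by
  rw [pv_floordiv_len, PySem.List.slice_from_natCast]; rfl

-- row-level equivalence: a top/bottom row pair matches the canonical row iff the four half-slices agree
theorem pv_row (r s : List Int) :
    (r = pvF r ∧ s = pvF r) ↔ (pvL r = pvR r ∧ pvL r = pvL s ∧ pvL r = pvR s) := by
  constructor
  · rintro ⟨h1, h2⟩
    have hk := congrArg List.length h1
    simp only [pvF, List.length_append] at hk
    have hks := congrArg List.length h2
    simp only [pvF, List.length_append] at hks
    refine ⟨?_, ?_, ?_⟩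
    · show pvL r = r.drop (r.length / 2)
      calc pvL r = (pvF r).drop (pvL r).length := List.drop_left.symm
        _ = r.drop (r.length / 2) := by
            rw [← h1, show (pvL r).length = r.length / 2 by omega]
    · show pvL r = s.take (s.length / 2)
      calc pvL r = (pvF r).take (pvL r).length := List.take_left.symm
        _ = s.take (s.length / 2) := by
            rw [← h2, show (pvL r).length = s.length / 2 by omega]
    · show pvL r = s.drop (s.length / 2)
      calc pvL r = (pvF r).drop (pvL r).length := List.drop_left.symm
        _ = s.drop (s.length / 2) := by
            rw [← h2, show (pvL r).length = s.length / 2 by omega]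
  · rintro ⟨h1, h2, h3⟩
    constructor
    · conv_lhs => rw [← List.take_append_drop (r.length / 2) r]
      show pvL r ++ pvR r = pvF r
      rw [← h1, pvF]
    · conv_lhs => rw [← List.take_append_drop (s.length / 2) s]
      show pvL s ++ pvR s = pvF r
      rw [← h2, ← h3, pvF]

theorem pv_pair_iff : ∀ (T Bo : List (List Int)), T.length = Bo.length →
    ((T = T.map pvF ∧ Bo = T.map pvF) ↔
      (T.map pvL = T.map pvR ∧ T.map pvL = Bo.map pvL ∧ T.map pvL = Bo.map pvR)) := by
  intro T
  induction T with
  | nil =>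
    intro Bo hb
    cases Bo with
    | nil => simp
    | cons s Bo' => simp at hb
  | cons r T' ih =>
    intro Bo hb
    cases Bo with
    | nil => simp at hb
    | cons s Bo' =>
      simp only [List.length_cons, Nat.succ_inj] at hb
      simp only [List.map_cons, List.cons.injEq]
      rw [show (r = pvF r ∧ T' = List.map pvF T') ∧ s = pvF r ∧ Bo' = List.map pvF T' ↔
            (r = pvF r ∧ s = pvF r) ∧ (T' = List.map pvF T' ∧ Bo' = List.map pvF T') by tauto,
          pv_row, ih Bo' hb]
      tauto

theorem pv_A_iff (obraz : List (List Int)) :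
    (sprawdz_rekurencje obraz = true ↔
      ((obraz.take (obraz.length / 2)).map pvL = (obraz.take (obraz.length / 2)).map pvR ∧
       (obraz.take (obraz.length / 2)).map pvL = (obraz.drop (obraz.length / 2)).map pvL ∧
       (obraz.take (obraz.length / 2)).map pvL = (obraz.drop (obraz.length / 2)).map pvR)) := by
  simp only [sprawdz_rekurencje, funext pv_sliceL, funext pv_sliceR]
  simp only [pv_floordiv_len, PySem.List.slice_to_natCast, PySem.List.slice_from_natCast]
  by_cases h : ((obraz.take (obraz.length / 2)).map pvL = (obraz.take (obraz.length / 2)).map pvR ∧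
       (obraz.take (obraz.length / 2)).map pvL = (obraz.drop (obraz.length / 2)).map pvL ∧
       (obraz.take (obraz.length / 2)).map pvL = (obraz.drop (obraz.length / 2)).map pvR)
  · obtain ⟨h1, h2, h3⟩ := h
    rw [if_pos (by simp only [Bool.and_eq_true, beq_iff_eq, and_assoc]; exact ⟨h1, h2, h3⟩)]
    exact iff_of_true rfl ⟨h1, h2, h3⟩
  · rw [if_neg (by simpa [Bool.and_eq_true, beq_iff_eq, and_assoc] using h)]
    simp only [Bool.false_eq_true, false_iff]
    exact h

theorem pv_B_iff (obraz : List (List Int)) :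
    (sprawdz_rekurencje_alt obraz = true ↔
      obraz = (obraz.take (obraz.length / 2)).map pvF ++ (obraz.take (obraz.length / 2)).map pvF) := by
  simp only [sprawdz_rekurencje_alt, pv_floordiv_len, PySem.List.slice_to_natCast, beq_iff_eq]
  rw [show (fun wiersz : List Int =>
      wiersz.take (wiersz.length / 2) ++ wiersz.take (wiersz.length / 2)) = pvF from
    funext (fun r => rfl)]

theorem sprawdz_rekurencje_spec : Claim_equal_sprawdz_rekurencje := by
  unfold Claim_equal_sprawdz_rekurencje
  intro obraz _
  unfold Spec_sprawdz_rekurencje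
  rw [Bool.eq_iff_iff, pv_A_iff, pv_B_iff]
  by_cases hpar : obraz.length % 2 = 0
  · rw [← pv_pair_iff _ _ (by simp only [List.length_take, List.length_drop]; omega)]
    constructor
    · rintro ⟨h1, h2⟩
      calc obraz = obraz.take (obraz.length / 2) ++ obraz.drop (obraz.length / 2) :=
            (List.take_append_drop _ _).symm
        _ = _ := congrArg₂ (· ++ ·) h1 h2
    · intro h
      have h' : obraz.take (obraz.length / 2) ++ obraz.drop (obraz.length / 2) =
          (obraz.take (obraz.length / 2)).map pvF ++ (obraz.take (obraz.length / 2)).map pvF := by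
        rw [List.take_append_drop]; exact h
      exact List.append_inj h' (by simp)
  · constructor
    · rintro ⟨-, h2, -⟩
      exfalso
      have hlen := congrArg List.length h2
      simp only [List.length_map, List.length_take, List.length_drop] at hlen
      omega
    · intro h
      exfalso
      have hlen := congrArg List.length h
      simp only [List.length_append, List.length_map, List.length_take] at hlen
      omega
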